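-- pv_equiv track=rewrite | github.com/aojsd/GPU_Offloading | src/MoE/policy_simulator.py | _default_initial_cache
-- ===== SOURCE A (Python) =====
-- def _default_initial_cache(cache_size: int, num_layers: int,
--                            num_experts: int) -> list[tuple[int, int]]:
--     """Default initial cache: fill uniformly across layers.
--
--     Iterates expert 0 for all layers, then expert 1 for all layers, etc.,
--     stopping when cache_size entries have been added.
--     """
--     initial = []
--     for eid in range(num_experts):
--         for layer in range(num_layers):
--             if len(initial) >= cache_size:
--                 return initial
--             initial.append((layer, eid))
--     return initial
-- ===== SOURCE B (Python) =====
-- def _default_initial_cache(cache_size: int, num_layers: int,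
--                            num_experts: int) -> list[tuple[int, int]]:
--     """Closed-form fill: precompute the entry count, then one pass of divmod."""
--     count = max(0, min(cache_size, max(num_layers, 0) * max(num_experts, 0)))
--     return [(i % num_layers, i // num_layers) for i in range(count)]
-- ===== Notes on version B (the rewrite author's own statement) =====
-- stated objective: simpler
-- what changed: Replaced the nested expert/layer loops with length-guarded early return by a precomputed entry count and a single divmod comprehension recovering (layer, expert) = (i % num_layers, i // num_layers).
import Mathlib
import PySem

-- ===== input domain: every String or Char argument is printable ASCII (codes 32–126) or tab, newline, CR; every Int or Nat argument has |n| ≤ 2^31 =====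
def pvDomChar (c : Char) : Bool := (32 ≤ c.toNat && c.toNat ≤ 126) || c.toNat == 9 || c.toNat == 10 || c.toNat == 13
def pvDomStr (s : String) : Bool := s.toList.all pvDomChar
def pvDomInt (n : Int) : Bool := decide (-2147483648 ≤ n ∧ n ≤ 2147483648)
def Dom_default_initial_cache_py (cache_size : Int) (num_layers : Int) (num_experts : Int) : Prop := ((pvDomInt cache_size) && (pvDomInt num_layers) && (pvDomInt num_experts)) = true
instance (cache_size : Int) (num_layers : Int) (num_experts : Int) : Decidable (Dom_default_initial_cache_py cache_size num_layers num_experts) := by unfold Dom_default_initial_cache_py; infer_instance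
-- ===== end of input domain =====

-- B replaces A's nested expert/layer loops with a precomputed entry count and one
-- divmod pass (objective: simpler).

-- ===== PORT A =====
-- inner 'for layer in range(num_layers)' loop, as a counter (Python's range is lazy);
-- returns (acc, true) on the early 'return initial'
def pvA_inner (cache_size : Int) (num_layers : Int) (eid : Int) (layer : Int)
    (acc : List (Int × Int)) : List (Int × Int) × Bool :=
  if _h : layer < num_layers then
    if (acc.length : Int) ≥ cache_size then (acc, true)
    else pvA_inner cache_size num_layers eid (layer + 1) (acc ++ [(layer, eid)])
  else (acc, false)
termination_by (num_layers - layer).toNat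
decreasing_by omega

-- outer 'for eid in range(num_experts)' loop, as a counter
def pvA_outer (cache_size : Int) (num_layers : Int) (num_experts : Int) (eid : Int)
    (acc : List (Int × Int)) : List (Int × Int) :=
  if _h : eid < num_experts then
    match pvA_inner cache_size num_layers eid 0 acc with
    | (acc', true) => acc'
    | (acc', false) => pvA_outer cache_size num_layers num_experts (eid + 1) acc'
  else acc
termination_by (num_experts - eid).toNat
decreasing_by omega

def default_initial_cache_py (cache_size : Int) (num_layers : Int) (num_experts : Int) : List (Int × Int) :=
  pvA_outer cache_size num_layers num_experts 0 []

-- ===== PORT B =====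
def default_initial_cache_py_alt (cache_size : Int) (num_layers : Int) (num_experts : Int) : List (Int × Int) :=
  let count := max 0 (min cache_size (max num_layers 0 * max num_experts 0))
  (PySem.List.pyRange 0 count 1).map
    (fun i => (PySem.Int.mod i num_layers, PySem.Int.floordiv i num_layers))

-- ===== PRECONDITION & SPEC =====
def Spec_default_initial_cache_py (cache_size : Int) (num_layers : Int) (num_experts : Int) (out : List (Int × Int)) : Prop := out = default_initial_cache_py_alt cache_size num_layers num_experts
instance (cache_size : Int) (num_layers : Int) (num_experts : Int) (out : List (Int × Int)) : Decidable (Spec_default_initial_cache_py cache_size num_layers num_experts out) := by unfold Spec_default_initial_cache_py; infer_instance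

-- ===== CLAIM (what is proved, stated in full; the proofs are below) =====
def Claim_equal_default_initial_cache_py : Prop := ∀ (cache_size : Int) (num_layers : Int) (num_experts : Int), Dom_default_initial_cache_py cache_size num_layers num_experts → Spec_default_initial_cache_py cache_size num_layers num_experts (default_initial_cache_py cache_size num_layers num_experts)

-- ===== LEMMAS AND PROOFS =====

-- the canonical j-th cache entry for layer count l
def pvG (l : Nat) (k : Nat) : Int × Int := (((k % l : Nat) : Int), ((k / l : Nat) : Int))

-- L ≤ 0: the inner loop runs zero times, so the outer loop never changes acc
theorem pvA_outer_nil (cs L E : Int) (hL : L ≤ 0) :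
    ∀ (n : Nat) (eid : Int), (E - eid).toNat = n →
    ∀ (acc : List (Int × Int)), pvA_outer cs L E eid acc = acc := by
  intro n
  induction n using Nat.strong_induction_on with
  | _ n ih =>
    intro eid hn acc
    rw [pvA_outer]
    by_cases h : eid < E
    · rw [dif_pos h, pvA_inner, dif_neg (by omega : ¬ (0 : Int) < L)]
      exact ih ((E - (eid + 1)).toNat) (by omega) (eid + 1) rfl acc
    · rw [dif_neg h]

theorem pvA_inner_eq (cs : Int) (l eid : Nat) :
    ∀ (k a : Nat), a + k = l → eid * l + a ≤ cs.toNat →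
    pvA_inner cs (l : Int) (eid : Int) (a : Int)
        ((List.range (eid * l + a)).map (pvG l))
      = ((List.range (min cs.toNat (eid * l + l))).map (pvG l),
         decide (cs.toNat < eid * l + l)) := by
  intro k
  induction k with
  | zero =>
    intro a hal hm
    have ha : a = l := by omega
    rw [ha] at hm ⊢
    rw [pvA_inner, dif_neg (by omega : ¬ ((l : Nat) : Int) < ((l : Nat) : Int))]
    have h1 : min cs.toNat (eid * l + l) = eid * l + l := by omega
    have h2 : decide (cs.toNat < eid * l + l) = false := by simp; omega
    rw [h1, h2]
  | succ k ih =>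
    intro a hal hm
    have hal' : (a : Int) < (l : Int) := by exact_mod_cast (by omega : a < l)
    rw [pvA_inner, dif_pos hal']
    simp only [List.length_map, List.length_range]
    by_cases hstop : ((eid * l + a : Nat) : Int) ≥ cs
    · have hc : cs.toNat ≤ eid * l + a := by omega
      have hc' : cs.toNat = eid * l + a := by omega
      simp only [ge_iff_le] at hstop
      rw [if_pos hstop]
      have h1 : min cs.toNat (eid * l + l) = cs.toNat := by omega
      have h2 : decide (cs.toNat < eid * l + l) = true := by
        simp; omega
      rw [h1, h2, hc']
    · simp only [ge_iff_le] at hstop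
      rw [if_neg hstop]
      have hlt : eid * l + a < cs.toNat := by omega
      have hg : pvG l (eid * l + a) = ((a : Int), (eid : Int)) := by
        unfold pvG
        have hmod : (eid * l + a) % l = a := by
          rw [Nat.mul_comm, Nat.mul_add_mod, Nat.mod_eq_of_lt (by omega)]
        have hdiv : (eid * l + a) / l = eid := by
          rw [Nat.mul_comm, Nat.mul_add_div (by omega)]
          rw [Nat.div_eq_of_lt (by omega)]
          omega
        rw [hmod, hdiv]
      have happ : (List.range (eid * l + a)).map (pvG l) ++ [((a : Int), (eid : Int))]
          = (List.range (eid * l + (a + 1))).map (pvG l) := by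
        have : eid * l + (a + 1) = (eid * l + a) + 1 := by omega
        rw [this, List.range_succ, List.map_append, List.map_singleton, hg]
      have hcast : ((a : Int) + 1) = ((a + 1 : Nat) : Int) := by push_cast; ring
      rw [happ, hcast, ih (a + 1) (by omega) (by omega)]

-- main lemma for the outer loop, L > 0 throughout
theorem pvA_outer_eq (cs : Int) (l e : Nat) :
    ∀ (k eid : Nat), eid + k = e → eid * l ≤ cs.toNat →
    pvA_outer cs (l : Int) (e : Int) (eid : Int)
        ((List.range (eid * l)).map (pvG l))
      = (List.range (min cs.toNat (e * l))).map (pvG l) := by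
  intro k
  induction k with
  | zero =>
    intro eid he hm
    have heq : eid = e := by omega
    rw [heq] at hm ⊢
    rw [pvA_outer, dif_neg (by omega : ¬ ((e : Nat) : Int) < ((e : Nat) : Int))]
    have hmin : min cs.toNat (e * l) = e * l := by omega
    rw [hmin]
  | succ k ih =>
    intro eid he hm
    have he' : (eid : Int) < (e : Int) := by exact_mod_cast (by omega : eid < e)
    rw [pvA_outer, dif_pos he']
    have hinner := pvA_inner_eq cs l eid l 0 (by omega) (by omega)
    simp only [Nat.add_zero] at hinner
    have hz : ((0 : Nat) : Int) = 0 := rfl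
    rw [hz] at hinner
    rw [hinner]
    by_cases hc : cs.toNat < eid * l + l
    · simp only [hc, decide_true]
      have : min cs.toNat (eid * l + l) = cs.toNat := by omega
      rw [this]
      have : min cs.toNat (e * l) = cs.toNat := by
        have : eid * l + l ≤ e * l := by
          have : eid + 1 ≤ e := by omega
          calc eid * l + l = (eid + 1) * l := by ring
          _ ≤ e * l := Nat.mul_le_mul_right l this
        omega
      rw [this]
    · simp only [decide_eq_false (by omega : ¬ cs.toNat < eid * l + l)]
      have h1 : min cs.toNat (eid * l + l) = eid * l + l := by omega
      have h2 : eid * l + l = (eid + 1) * l := by ring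
      have hcast : ((eid : Int) + 1) = ((eid + 1 : Nat) : Int) := by push_cast; ring
      rw [h1, h2, hcast]
      exact ih (eid + 1) (by omega) (by omega)

-- unfold B's 'let count' (definitional)
theorem pvB_unfold (cs L E : Int) :
    default_initial_cache_py_alt cs L E
      = (PySem.List.pyRange 0 (max 0 (min cs (max L 0 * max E 0))) 1).map
          (fun i => (PySem.Int.mod i L, PySem.Int.floordiv i L)) := rfl

-- B's comprehension is the canonical map
theorem pvB_eq (cs L E : Int) (hL : 0 < L) :
    default_initial_cache_py_alt cs L E
      = (List.range (max 0 (min cs (max L 0 * max E 0))).toNat).map (pvG L.toNat) := by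
  rw [pvB_unfold, PySem.List.pyRange_one]
  simp only [Int.sub_zero, List.map_map]
  apply List.map_congr_left
  intro k _
  simp only [Function.comp_apply, Int.zero_add]
  have hLc : (L.toNat : Int) = L := Int.toNat_of_nonneg (by omega)
  unfold pvG
  rw [← hLc, PySem.Int.mod_natCast, PySem.Int.floordiv_natCast]
  simp

-- ===== VERDICT (by name: the statement is the Claim_ definition above) =====
theorem default_initial_cache_py_spec : Claim_equal_default_initial_cache_py := by
  intro cs L E _
  unfold Spec_default_initial_cache_py default_initial_cache_py
  by_cases hL : L ≤ 0
  · rw [pvA_outer_nil cs L E hL ((E - 0).toNat) 0 rfl []]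
    have h0 : max 0 (min cs (max L 0 * max E 0)) = 0 := by
      have : max L 0 = 0 := by omega
      rw [this, Int.zero_mul]; omega
    rw [pvB_unfold, h0, PySem.List.pyRange_one_eq_nil le_rfl, List.map_nil]
  · rw [Int.not_le] at hL
    by_cases hE : E ≤ 0
    · rw [pvA_outer, dif_neg (by omega : ¬ (0 : Int) < E)]
      have h0 : max 0 (min cs (max L 0 * max E 0)) = 0 := by
        have : max E 0 = 0 := by omega
        rw [this, Int.mul_zero]; omega
      rw [pvB_unfold, h0, PySem.List.pyRange_one_eq_nil le_rfl, List.map_nil]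
    · rw [Int.not_le] at hE
      rw [pvB_eq cs L E hL]
      have hLc : ((L.toNat : Nat) : Int) = L := Int.toNat_of_nonneg (by omega)
      have hEc : ((E.toNat : Nat) : Int) = E := Int.toNat_of_nonneg (by omega)
      have h0 : ((0 : Nat) : Int) = 0 := rfl
      have hmain := pvA_outer_eq cs L.toNat E.toNat E.toNat 0 (by omega) (by omega)
      simp only [Nat.zero_mul, List.range_zero, List.map_nil, h0] at hmain
      rw [← hLc, ← hEc, hmain]
      congr 1
      rw [max_eq_left (Int.natCast_nonneg L.toNat), max_eq_left (Int.natCast_nonneg E.toNat),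
          ← Int.natCast_mul, Nat.mul_comm E.toNat L.toNat]
      congr 1
      omega
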